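-- pv_equiv track=rewrite | github.com/budhiahimanshu96/coding | Google Foobar/Level 2.2.py | solution
-- ===== SOURCE A (Python) =====
-- def solution(x, y):
--     a = 2
--     b = x
--     ans = 1
--     i = a
--     while i<=x:
--         ans += i
--         i+=1
--
--     i = b
--     j = 2
--     while j<=y:
--         ans += i
--         i+=1
--         j+=1
--     return str(ans)
-- ===== SOURCE B (Python) =====
-- def solution(x, y):
--     # closed-form: 1 + sum(2..x) + sum of (y-1) terms starting at x
--     t1 = x * (x + 1) // 2 - 1 if x >= 2 else 0
--     t2 = (y - 1) * x + (y - 2) * (y - 1) // 2 if y >= 2 else 0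
--     return str(1 + t1 + t2)
-- ===== Notes on version B (the rewrite author's own statement) =====
-- stated objective: faster
-- what changed: Replaces both accumulation while-loops by closed-form triangular-number formulas evaluated in O(1).
import Mathlib
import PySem

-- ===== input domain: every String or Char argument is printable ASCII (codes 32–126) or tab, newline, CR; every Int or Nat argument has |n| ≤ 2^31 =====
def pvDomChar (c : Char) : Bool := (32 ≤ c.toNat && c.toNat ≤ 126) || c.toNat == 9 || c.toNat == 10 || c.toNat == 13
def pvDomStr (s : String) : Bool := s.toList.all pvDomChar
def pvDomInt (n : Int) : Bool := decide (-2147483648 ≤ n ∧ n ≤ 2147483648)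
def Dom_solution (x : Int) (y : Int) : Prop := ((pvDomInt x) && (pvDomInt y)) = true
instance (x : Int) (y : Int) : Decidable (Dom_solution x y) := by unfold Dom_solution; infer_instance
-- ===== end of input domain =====

-- B replaces A's two accumulation while-loops by closed-form triangular-number formulas (O(1) vs O(x+y)).

-- ===== PORT A =====
-- first while loop: while i <= x: ans += i; i += 1  (fuel = exact residual iteration count)
def solLoop1 (x : Int) : Nat → Int → Int → Int
  | 0, _, ans => ans
  | Nat.succ n, i, ans => if i ≤ x then solLoop1 x n (i + 1) (ans + i) else ans

-- second while loop: while j <= y: ans += i; i += 1; j += 1  (fuel = exact residual iteration count)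
def solLoop2 (y : Int) : Nat → Int → Int → Int → Int
  | 0, _, _, ans => ans
  | Nat.succ n, i, j, ans => if j ≤ y then solLoop2 y n (i + 1) (j + 1) (ans + i) else ans

def solution (x : Int) (y : Int) : String :=
  let ans := solLoop1 x (x + 1 - 2).toNat 2 1
  PySem.Int.toStr (solLoop2 y (y + 1 - 2).toNat x 2 ans)

-- ===== PORT B =====
def solution_alt (x : Int) (y : Int) : String :=
  let t1 : Int := if x ≥ 2 then PySem.Int.floordiv (x * (x + 1)) 2 - 1 else 0
  let t2 : Int := if y ≥ 2 then (y - 1) * x + PySem.Int.floordiv ((y - 2) * (y - 1)) 2 else 0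
  PySem.Int.toStr (1 + t1 + t2)

-- ===== PRECONDITION & SPEC =====
def Spec_solution (x : Int) (y : Int) (out : String) : Prop := out = solution_alt x y
instance (x : Int) (y : Int) (out : String) : Decidable (Spec_solution x y out) := by unfold Spec_solution; infer_instance

-- ===== CLAIM (what is proved, stated in full; the proofs are below) =====
def Claim_equal_solution : Prop := ∀ (x : Int) (y : Int), Dom_solution x y → Spec_solution x y (solution x y)

-- ===== LEMMAS AND PROOFS =====

theorem solLoop1_closed (x : Int) : ∀ n (i ans : Int), (x + 1 - i).toNat = n →
    solLoop1 x n i ans = ans + (if i ≤ x then (x * (x + 1) - (i - 1) * i) / 2 else 0) := by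
  intro n
  induction n with
  | zero =>
    intro i ans hn
    have : ¬ i ≤ x := by omega
    simp [solLoop1, this]
  | succ n ih =>
    intro i ans hn
    rw [solLoop1]
    by_cases h : i ≤ x
    · simp only [h, if_pos]
      rw [ih (i + 1) (ans + i) (by omega)]
      by_cases h2 : i + 1 ≤ x
      · simp only [h2, if_pos]
        -- both numerators are even; reduce to linear arithmetic
        obtain ⟨k, hk⟩ : Even ((i - 1) * i) := by
          have h4 := Int.even_mul_succ_self (i - 1)
          have e4 : (i - 1) * (i - 1 + 1) = (i - 1) * i := by ring
          rwa [e4] at h4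
        have hk' : (i - 1) * i = 2 * k := by omega
        obtain ⟨m, hm⟩ : Even (x * (x + 1)) := Int.even_mul_succ_self x
        have hm' : x * (x + 1) = 2 * m := by omega
        have e : (i + 1 - 1) * (i + 1) = 2 * k + 2 * i := by rw [← hk']; ring
        rw [e, hk', hm']
        omega
      · simp only [h2, if_neg, not_false_iff]
        have e : x * (x + 1) - (i - 1) * i = 2 * i := by
          have hix : x = i := by omega
          subst hix; ring
        rw [show x * (x + 1) - (i - 1) * i = 2 * i from e]
        omega
    · simp [h]

theorem solLoop2_closed (y : Int) : ∀ n (i j ans : Int), (y + 1 - j).toNat = n →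
    solLoop2 y n i j ans = ans + (if j ≤ y then (y + 1 - j) * i + ((y - j) * (y + 1 - j)) / 2 else 0) := by
  intro n
  induction n with
  | zero =>
    intro i j ans hn
    have : ¬ j ≤ y := by omega
    simp [solLoop2, this]
  | succ n ih =>
    intro i j ans hn
    rw [solLoop2]
    by_cases h : j ≤ y
    · simp only [h, if_pos]
      rw [ih (i + 1) (j + 1) (ans + i) (by omega)]
      by_cases h2 : j + 1 ≤ y
      · simp only [h2, if_pos]
        obtain ⟨k, hk⟩ : Even ((y - j - 1) * (y - j)) := by
          have h4 := Int.even_mul_succ_self (y - j - 1)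
          have e4 : (y - j - 1) * (y - j - 1 + 1) = (y - j - 1) * (y - j) := by ring
          rwa [e4] at h4
        have hk2 : (y - j - 1) * (y - j) = 2 * k := by omega
        have e1 : (y - (j + 1)) * (y + 1 - (j + 1)) = 2 * k := by
          rw [← hk2]; ring
        have e2 : (y - j) * (y + 1 - j) = 2 * k + 2 * (y - j) := by
          rw [← hk2]; ring
        rw [e1, e2]
        have e3 : (y + 1 - (j + 1)) * (i + 1) = (y - j) * i + (y - j) := by ring
        have e4 : (y + 1 - j) * i = (y - j) * i + i := by ring
        rw [e3, e4]
        omega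
      · simp only [h2, if_neg, not_false_iff]
        have hjy : y = j := by omega
        have e1 : (y - j) * (y + 1 - j) = 0 := by subst hjy; ring
        have e2 : (y + 1 - j) * i = i := by subst hjy; ring
        rw [e1, e2]
        omega
    · simp [h]

-- ===== VERDICT (by name: the statement is the Claim_ definition above) =====
theorem solution_spec : Claim_equal_solution := by
  unfold Claim_equal_solution
  intro x y _
  unfold Spec_solution
  show solution x y = solution_alt x y
  simp only [solution, solution_alt]
  rw [solLoop1_closed x (x + 1 - 2).toNat 2 1 rfl,
      solLoop2_closed y (y + 1 - 2).toNat x 2 _ rfl]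
  congr 1
  have hfd1 : PySem.Int.floordiv (x * (x + 1)) 2 = x * (x + 1) / 2 :=
    PySem.Int.floordiv_eq_ediv_of_pos (by omega)
  have hfd2 : PySem.Int.floordiv ((y - 2) * (y - 1)) 2 = (y - 2) * (y - 1) / 2 :=
    PySem.Int.floordiv_eq_ediv_of_pos (by omega)
  simp only [hfd1, hfd2]
  by_cases hx : (2 : Int) ≤ x
  · by_cases hy : (2 : Int) ≤ y
    · simp only [hx, hy, if_pos]
      have e1 : x * (x + 1) - (2 - 1) * 2 = x * (x + 1) - 2 := by ring
      have e2 : (y + 1 - 2) * x = (y - 1) * x := by ring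
      have e3 : (y - 2) * (y + 1 - 2) = (y - 2) * (y - 1) := by ring
      rw [e1, e2, e3]
      obtain ⟨m, hm⟩ : Even (x * (x + 1)) := Int.even_mul_succ_self x
      have hm' : x * (x + 1) = 2 * m := by omega
      obtain ⟨k, hk⟩ : Even ((y - 2) * (y - 1)) := by
        have h4 := Int.even_mul_succ_self (y - 2)
        have e4 : (y - 2) * (y - 2 + 1) = (y - 2) * (y - 1) := by ring
        rwa [e4] at h4
      have hk' : (y - 2) * (y - 1) = 2 * k := by omega
      rw [hm', hk']
      omega
    · have hy' : ¬ (2 : Int) ≤ y := hy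
      simp only [hx, if_pos, hy', if_neg, not_false_iff]
      have e1 : x * (x + 1) - (2 - 1) * 2 = x * (x + 1) - 2 := by ring
      rw [e1]
      obtain ⟨m, hm⟩ : Even (x * (x + 1)) := Int.even_mul_succ_self x
      have hm' : x * (x + 1) = 2 * m := by omega
      rw [hm']
      omega
  · by_cases hy : (2 : Int) ≤ y
    · simp only [hx, hy, if_pos, if_neg, not_false_iff]
      have e2 : (y + 1 - 2) * x = (y - 1) * x := by ring
      have e3 : (y - 2) * (y + 1 - 2) = (y - 2) * (y - 1) := by ring
      rw [e2, e3]
    · simp [hx, hy]
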